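-- pv_equiv track=rewrite | github.com/LiXin-Ren/Algorithm_Examination | 8.28好未来/2AddOr.py | solution
-- ===== SOURCE A (Python) =====
-- def solution(x, k):
--     y = 0
--     power = 0
--     while k > 0:
--         if x % 2 == 0:
--             y += pow(2, power)*(k % 2)
--             x = x >> 1
--             k = k >> 1
--             power += 1
--         else:
--             power += 1
--             x = x >> 1
--     return y
-- ===== SOURCE B (Python) =====
-- def solution(x, k):
--     # Two staged passes: first collect the positions of x's zero bits into a
--     # table (as many as k has bits), then combine k's bits with those positions.
--     if k <= 0:
--         return 0
--     need = k.bit_length()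
--     positions = []
--     p = 0
--     while len(positions) < need:
--         if x % 2 == 0:
--             positions.append(p)
--         x >>= 1
--         p += 1
--     y = 0
--     for i, p in enumerate(positions):
--         y += (k >> i) % 2 * 2 ** p
--     return y
-- ===== Notes on version B (the rewrite author's own statement) =====
-- stated objective: alternative
-- what changed: Replaces A's single inline scan with power/y accumulators by two staged passes: build a table of x's zero-bit positions (one per bit of k, via bit_length), then a separate combine pass summing k's bits shifted to those positions.
-- outside the precondition, e.g. on solution(-2, 1): A returns 1, B returns 1
import Mathlib
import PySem

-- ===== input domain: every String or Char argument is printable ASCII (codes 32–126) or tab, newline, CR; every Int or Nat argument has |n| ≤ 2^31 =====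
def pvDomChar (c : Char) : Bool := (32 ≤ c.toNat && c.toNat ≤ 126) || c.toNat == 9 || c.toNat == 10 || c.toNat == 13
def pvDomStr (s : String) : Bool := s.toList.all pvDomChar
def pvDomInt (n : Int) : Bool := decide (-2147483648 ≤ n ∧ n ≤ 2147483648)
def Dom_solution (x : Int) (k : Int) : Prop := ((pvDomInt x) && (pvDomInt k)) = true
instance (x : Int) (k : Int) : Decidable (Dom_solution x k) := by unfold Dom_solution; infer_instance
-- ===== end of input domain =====

-- B replaces A's inline scan (power/y accumulators) by two staged passes: a table of
-- x's zero-bit positions, then a combine pass over it (alternative decomposition, not faster).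


-- ===== PORT A =====
-- A's while-loop, step for step; the fuel argument only makes the recursion total
-- (on every input admitted by Pre_solution the fuel below never runs out).
def pvLoopA (fuel : Nat) (x k : Int) (power : Nat) (y : Int) : Int :=
  match fuel with
  | 0 => y
  | fuel + 1 =>
    if k > 0 then
      if PySem.Int.mod x 2 == 0 then
        pvLoopA fuel (PySem.Int.floordiv x 2) (PySem.Int.floordiv k 2) (power + 1)
          (y + 2 ^ power * PySem.Int.mod k 2)
      else
        pvLoopA fuel (PySem.Int.floordiv x 2) k (power + 1) y
    else y

def solution (x : Int) (k : Int) : Int :=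
  pvLoopA (x.toNat + k.toNat + 1) x k 0 0

-- ===== PORT B =====
-- B's first pass: append each zero-bit position of x until `need` of them are
-- collected; fuel only makes it total (never exhausted when 0 ≤ x).
def pvZeroPositions (fuel : Nat) (x : Int) (p : Int) (need : Nat) (acc : List Int) : List Int :=
  match fuel with
  | 0 => acc
  | fuel + 1 =>
    if acc.length < need then
      pvZeroPositions fuel (x >>> 1) (p + 1) need
        (if PySem.Int.mod x 2 == 0 then acc ++ [p] else acc)
    else acc

-- k.bit_length() is PySem.Int.bitLength; `(k >> i) % 2 * 2 ** p` is ported with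
-- Nat shift/exponent via .toNat, exact here since enumerate indices i and the
-- collected positions p are nonnegative.
def solution_alt (x : Int) (k : Int) : Int :=
  if k ≤ 0 then 0
  else
    let need := PySem.Int.bitLength k
    let positions := pvZeroPositions (x.toNat + need + 1) x 0 need []
    (PySem.List.enumerate positions 0).foldl
      (fun y ip => y + PySem.Int.mod (k >>> ip.1.toNat) 2 * 2 ^ ip.2.toNat) 0

-- ===== PRECONDITION & SPEC =====
-- Pre_ excludes negative x together with positive k: there A (and B) loop forever as soon as
-- x's finitely many zero bits are exhausted; on the few such inputs where k is small enough
-- A still returns, and B returns the same value (cited in claim.json).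
def Pre_solution (x : Int) (k : Int) : Prop := k ≤ 0 ∨ 0 ≤ x
instance (x : Int) (k : Int) : Decidable (Pre_solution x k) := by unfold Pre_solution; infer_instance
def pvWitness_solution : Int × Int := (10, 3)

def Spec_solution (x : Int) (k : Int) (out : Int) : Prop := out = solution_alt x k
instance (x : Int) (k : Int) (out : Int) : Decidable (Spec_solution x k out) := by unfold Spec_solution; infer_instance

-- ===== CLAIM (what is proved, stated in full; the proofs are below) =====
def Claim_equal_solution : Prop := ∀ (x : Int) (k : Int), Dom_solution x k → Pre_solution x k → Spec_solution x k (solution x k)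

-- ===== LEMMAS AND PROOFS =====

-- proof-only reference recursion: the value both programs compute
def pvRecB (fuel : Nat) (x k : Int) : Int :=
  match fuel with
  | 0 => 0
  | fuel + 1 =>
    if k ≤ 0 then 0
    else if PySem.Int.mod x 2 == 0 then
      PySem.Int.mod k 2 + 2 * pvRecB fuel (PySem.Int.floordiv x 2) (PySem.Int.floordiv k 2)
    else
      2 * pvRecB fuel (PySem.Int.floordiv x 2) k

-- the weighted sum B's second pass computes, with a general start index
def pvG (k : Int) (s : Int) (L : List Int) : Int :=
  ((PySem.List.enumerate L s).map
    (fun ip => PySem.Int.mod (k >>> ip.1.toNat) 2 * 2 ^ ip.2.toNat)).sum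

theorem pvBitLen_le_toNat (k : Int) (hk : 0 < k) : PySem.Int.bitLength k ≤ k.toNat := by
  have h1 := PySem.Int.two_pow_bitLength_le k (by omega)
  have h2 := Nat.lt_two_pow_self (n := PySem.Int.bitLength k - 1)
  have : k.natAbs = k.toNat := by omega
  omega

theorem pvRecB_fuel (f : Nat) : ∀ (g : Nat) (x k : Int), 0 ≤ x →
    x.toNat + PySem.Int.bitLength k < f → x.toNat + PySem.Int.bitLength k < g →
    pvRecB f x k = pvRecB g x k := by
  induction f with
  | zero => intro g x k _ hf _; omega
  | succ f ih =>
    intro g x k hx hf hg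
    match g with
    | 0 => omega
    | g + 1 =>
      simp only [pvRecB]
      by_cases hk : k ≤ 0
      · simp [hk]
      · simp only [if_neg hk]
        have hk0 : 0 < k := by omega
        have hbl : PySem.Int.bitLength k = PySem.Int.bitLength (PySem.Int.floordiv k 2) + 1 :=
          PySem.Int.bitLength_of_pos hk0
        have hx2 : PySem.Int.floordiv x 2 = x / 2 := PySem.Int.floordiv_eq_ediv_of_pos (by omega)
        have hxge : 0 ≤ x / 2 := by positivity
        have hxle : (x / 2).toNat ≤ x.toNat := by omega
        by_cases he : PySem.Int.mod x 2 == 0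
        · simp only [he, if_true]
          rw [hx2, ih g (x / 2) (PySem.Int.floordiv k 2) hxge (by omega) (by omega)]
        · simp only [he, Bool.false_eq_true, if_false]
          have hxodd : ¬ (2 ∣ x) := by
            intro hd
            exact absurd (by simpa [PySem.Int.mod_eq_zero_iff_dvd] using hd)
              (by simpa using he)
          have hxpos : 0 < x := by
            rcases lt_or_eq_of_le hx with h | h
            · exact h
            · exact absurd (h ▸ (dvd_zero 2)) hxodd
          have hxlt : (x / 2).toNat < x.toNat := by omega
          rw [hx2, ih g (x / 2) k hxge (by omega) (by omega)]

-- A-side invariant: the loop with accumulators equals y + 2^power * pvRecB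
theorem pvLoopA_eq (f : Nat) : ∀ (x k : Int) (power : Nat) (y : Int), 0 ≤ x →
    pvLoopA f x k power y = y + 2 ^ power * pvRecB f x k := by
  induction f with
  | zero => intro x k power y _; simp [pvLoopA, pvRecB]
  | succ f ih =>
    intro x k power y hx
    simp only [pvLoopA, pvRecB]
    by_cases hk : k > 0
    · have hknle : ¬ k ≤ 0 := by omega
      simp only [if_pos hk, if_neg hknle]
      have hx2 : PySem.Int.floordiv x 2 = x / 2 := PySem.Int.floordiv_eq_ediv_of_pos (by omega)
      have hxge : 0 ≤ PySem.Int.floordiv x 2 := by rw [hx2]; positivity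
      by_cases he : PySem.Int.mod x 2 == 0
      · simp only [he, if_true]
        rw [ih _ _ _ _ hxge]; ring
      · simp only [he, Bool.false_eq_true, if_false]
        rw [ih _ _ _ _ hxge]; ring
    · have hkle : k ≤ 0 := by omega
      simp [if_neg hk, if_pos hkle]

-- collecting into a nonempty accumulator is collecting into [] and prepending
theorem pvZeroPositions_acc (f : Nat) : ∀ (x p : Int) (need : Nat) (acc : List Int),
    acc.length ≤ need →
    pvZeroPositions f x p need acc = acc ++ pvZeroPositions f x p (need - acc.length) [] := by
  induction f with
  | zero => intro x p need acc _; simp [pvZeroPositions]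
  | succ f ih =>
    intro x p need acc hlen
    simp only [pvZeroPositions]
    by_cases hlt : acc.length < need
    · have h0 : (0 : Nat) < need - acc.length := by omega
      simp only [if_pos hlt, List.length_nil, if_pos h0]
      by_cases he : PySem.Int.mod x 2 == 0
      · simp only [he, if_true, List.nil_append]
        rw [ih _ _ _ (acc ++ [p]) (by simp; omega), ih _ _ _ [p] (by simp; omega)]
        have harith : need - (acc ++ [p]).length = need - acc.length - 1 := by simp; omega
        rw [harith]
        simp [List.append_assoc]
      · simp only [he, Bool.false_eq_true, if_false]
        rw [ih _ _ _ acc (by omega)]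
    · have heq : acc.length = need := by omega
      simp [heq]

-- raising the start index by one while halving k leaves pvG unchanged (0 ≤ s)
theorem pvG_shift (L : List Int) : ∀ (k s : Int), 0 ≤ k → 0 ≤ s →
    pvG k (s + 1) L = pvG (PySem.Int.floordiv k 2) s L := by
  induction L with
  | nil => intro k s _ _; simp [pvG, PySem.List.enumerate_nil]
  | cons p L ih =>
    intro k s hk hs
    simp only [pvG, PySem.List.enumerate_cons, List.map_cons, List.sum_cons]
    have hk2 : PySem.Int.floordiv k 2 = k / 2 := PySem.Int.floordiv_eq_ediv_of_pos (by omega)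
    have hhead : k >>> (((s + 1).toNat : Nat) : Int)
        = PySem.Int.floordiv k 2 >>> ((s.toNat : Nat) : Int) := by
      rw [Int.shiftRight_natCast_right, Int.shiftRight_natCast_right, hk2,
        Int.shiftRight_eq_div_pow, Int.shiftRight_eq_div_pow,
        Int.ediv_ediv_of_nonneg (by omega : (0:Int) ≤ 2)]
      have : (s + 1).toNat = s.toNat + 1 := by omega
      rw [this, pow_succ]; push_cast; ring_nf
    rw [hhead]
    have htail := ih k (s + 1) hk (by omega)
    simp only [pvG] at htail
    rw [htail]

theorem pvShiftOne (a : Int) : a >>> (1 : Int) = PySem.Int.floordiv a 2 := by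
  rw [show (1 : Int) = ((1 : Nat) : Int) by norm_num, Int.shiftRight_natCast_right,
    Int.shiftRight_eq_div_pow, PySem.Int.floordiv_eq_ediv_of_pos (by omega : (0:Int) < 2)]
  norm_num

-- B's two passes equal the reference recursion
theorem pvG_collect (f : Nat) : ∀ (x k p : Int), 0 ≤ x → 0 ≤ k → 0 ≤ p →
    x.toNat + PySem.Int.bitLength k < f →
    pvG k 0 (pvZeroPositions f x p (PySem.Int.bitLength k) []) = 2 ^ p.toNat * pvRecB f x k := by
  induction f with
  | zero => intro x k p _ _ _ hf; omega
  | succ f ih =>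
    intro x k p hx hk hp hf
    by_cases hk0 : k ≤ 0
    · have : k = 0 := by omega
      subst this
      simp [pvZeroPositions, PySem.Int.bitLength_zero, pvG, PySem.List.enumerate_nil, pvRecB]
    · have hkpos : 0 < k := by omega
      have hbl : PySem.Int.bitLength k = PySem.Int.bitLength (PySem.Int.floordiv k 2) + 1 :=
        PySem.Int.bitLength_of_pos hkpos
      rw [PySem.Int.floordiv_eq_ediv_of_pos (by omega : (0:Int) < 2)] at hbl
      have hx2 : PySem.Int.floordiv x 2 = x / 2 := PySem.Int.floordiv_eq_ediv_of_pos (by omega)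
      have hxge : 0 ≤ PySem.Int.floordiv x 2 := by rw [hx2]; positivity
      have hk2 : PySem.Int.floordiv k 2 = k / 2 := PySem.Int.floordiv_eq_ediv_of_pos (by omega)
      have hneed : 0 < PySem.Int.bitLength k := by omega
      simp only [pvZeroPositions, List.length_nil, if_pos hneed, pvShiftOne]
      by_cases he : PySem.Int.mod x 2 == 0
      · simp only [he, if_true, List.nil_append]
        rw [pvZeroPositions_acc f _ _ _ [p] (by simp; omega)]
        have harith : PySem.Int.bitLength k - ([p] : List Int).length
            = PySem.Int.bitLength (k / 2) := by simp; omega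
        rw [harith]
        set L := pvZeroPositions f (PySem.Int.floordiv x 2) (p + 1)
          (PySem.Int.bitLength (k / 2)) [] with hL
        have hcons : ([p] ++ L) = p :: L := rfl
        rw [hcons]
        simp only [pvG, PySem.List.enumerate_cons, List.map_cons, List.sum_cons]
        have hzero : k >>> (((0 : Int).toNat : Nat) : Int) = k := by
          rw [Int.shiftRight_natCast_right]; simp
        rw [hzero]
        have hshift := pvG_shift L k 0 hk (by omega)
        rw [hk2] at hshift
        simp only [pvG] at hshift
        rw [hshift]
        have hih := ih (PySem.Int.floordiv x 2) (k / 2) (p + 1)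
          hxge (by positivity) (by omega) (by rw [hx2]; omega)
        simp only [pvG] at hih
        rw [hih]
        have hpn : (p + 1).toNat = p.toNat + 1 := by omega
        simp only [pvRecB, if_neg hk0, he, if_true, hpn, pow_succ, hk2]
        ring
      · simp only [he, Bool.false_eq_true, if_false]
        have hxodd : ¬ (2 ∣ x) := by
          intro hd
          exact absurd (by simpa [PySem.Int.mod_eq_zero_iff_dvd] using hd)
            (by simpa using he)
        have hxpos : 0 < x := by
          rcases lt_or_eq_of_le hx with h | h
          · exact h
          · exact absurd (h ▸ (dvd_zero 2)) hxodd
        have hih := ih (PySem.Int.floordiv x 2) k (p + 1)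
          hxge hk (by omega) (by rw [hx2]; omega)
        simp only [pvG] at hih ⊢
        rw [hih]
        have hpn : (p + 1).toNat = p.toNat + 1 := by omega
        simp only [pvRecB, if_neg hk0, he, Bool.false_eq_true, if_false, hpn, pow_succ]
        ring

theorem solution_spec : Claim_equal_solution := by
  intro x k _ hpre
  unfold Spec_solution solution solution_alt
  by_cases hk : k ≤ 0
  · have hknot : ¬ k > 0 := by omega
    simp only [if_pos hk, pvLoopA, if_neg hknot]
  · have hx : 0 ≤ x := by rcases hpre with h | h; omega; exact h
    simp only [if_neg hk]
    rw [pvLoopA_eq _ x k 0 0 hx]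
    rw [PySem.List.foldl_add
      (l := PySem.List.enumerate (pvZeroPositions (x.toNat + PySem.Int.bitLength k + 1) x 0
        (PySem.Int.bitLength k) []) 0)
      (fun ip => PySem.Int.mod (k >>> (ip.1.toNat : Int)) 2 * 2 ^ ip.2.toNat) 0]
    have hcol := pvG_collect (x.toNat + PySem.Int.bitLength k + 1) x k 0 hx (by omega)
      (by omega) (by omega)
    simp only [pvG] at hcol
    rw [hcol]
    have hble := pvBitLen_le_toNat k (by omega)
    rw [pvRecB_fuel (x.toNat + k.toNat + 1) (x.toNat + PySem.Int.bitLength k + 1) x k hx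
      (by omega) (by omega)]
    norm_num
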